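-- pv_equiv track=rewrite | github.com/chan4lk/langgraph-workflows | fine-tuned-models/excel-column-mapper/generate_data.py | apply_naming_convention
-- ===== SOURCE A (Python) =====
-- def apply_naming_convention(text: str, convention: str) -> str:
--     """Apply different naming conventions to column names"""
--     if not text.strip():
--         return text
--
--     # First normalize to words
--     words = []
--     current_word = []
--
--     # Split by common delimiters and handle case changes
--     for char in text.replace('_', ' ').replace('-', ' ').replace('.', ' '):
--         if char.isupper() and current_word and not current_word[-1].isupper():
--             words.append(''.join(current_word))
--             current_word = [char]
--         elif char == ' ' and current_word:
--             words.append(''.join(current_word))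
--             current_word = []
--         else:
--             current_word.append(char)
--
--     if current_word:
--         words.append(''.join(current_word))
--
--     # Filter out empty strings and normalize case
--     words = [w.strip().lower() for w in words if w.strip()]
--
--     if not words:
--         return text
--
--     # Apply convention
--     if convention == 'snake_case':
--         return '_'.join(words)
--     elif convention == 'camelCase':
--         return words[0] + ''.join(w.capitalize() for w in words[1:])
--     elif convention == 'PascalCase':
--         return ''.join(w.capitalize() for w in words)
--     elif convention == 'kebab-case':
--         return '-'.join(words)
--     elif convention == 'UPPER_CASE':
--         return '_'.join(w.upper() for w in words)
--     elif convention == 'Title Case':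
--         return ' '.join(w.capitalize() for w in words)
--     elif convention == 'lowercase':
--         return ' '.join(words).lower()
--     elif convention == 'Sentence case':
--         return ' '.join(words).capitalize()
--     else:
--         # Default to original text if convention not recognized
--         return text
-- ===== SOURCE B (Python) =====
-- def apply_naming_convention(text: str, convention: str) -> str:
--     """Apply different naming conventions to column names"""
--     if not text.strip():
--         return text
--
--     s = text.replace('_', ' ').replace('-', ' ').replace('.', ' ')
--     # insert a space before each uppercase letter preceded by a non-uppercase char
--     marked = ''.join(
--         (' ' + c) if (c.isupper() and prev is not None and not prev.isupper()) else c
--         for prev, c in zip((None,) + tuple(s), s)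
--     )
--     words = [w.strip().lower() for w in marked.split(' ') if w.strip()]
--
--     if not words:
--         return text
--
--     formats = {
--         'snake_case': lambda ws: '_'.join(ws),
--         'camelCase': lambda ws: ws[0] + ''.join(w.capitalize() for w in ws[1:]),
--         'PascalCase': lambda ws: ''.join(w.capitalize() for w in ws),
--         'kebab-case': lambda ws: '-'.join(ws),
--         'UPPER_CASE': lambda ws: '_'.join(w.upper() for w in ws),
--         'Title Case': lambda ws: ' '.join(w.capitalize() for w in ws),
--         'lowercase': lambda ws: ' '.join(ws).lower(),
--         'Sentence case': lambda ws: ' '.join(ws).capitalize(),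
--     }
--     fmt = formats.get(convention)
--     return fmt(words) if fmt is not None else text
-- ===== Notes on version B (the rewrite author's own statement) =====
-- stated objective: idiomatic
-- what changed: A's stateful character loop that accumulates words in a current_word buffer is replaced by a stateless mark-then-split pipeline (insert a space before every uppercase letter preceded by a non-uppercase character, then split on spaces), and the if/elif convention chain is replaced by a dispatch dictionary of formatting functions.
import Mathlib
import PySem

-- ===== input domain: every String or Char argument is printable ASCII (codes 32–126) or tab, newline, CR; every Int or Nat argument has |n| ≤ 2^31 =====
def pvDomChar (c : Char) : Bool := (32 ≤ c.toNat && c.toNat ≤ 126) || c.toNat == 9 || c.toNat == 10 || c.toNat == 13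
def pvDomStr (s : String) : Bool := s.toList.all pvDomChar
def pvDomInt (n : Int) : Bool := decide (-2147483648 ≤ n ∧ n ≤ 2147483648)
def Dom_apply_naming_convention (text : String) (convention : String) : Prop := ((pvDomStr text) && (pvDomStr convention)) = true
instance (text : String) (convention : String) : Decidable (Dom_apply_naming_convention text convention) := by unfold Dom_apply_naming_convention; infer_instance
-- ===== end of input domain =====

-- B replaces A's stateful word-accumulator loop by a stateless mark-then-split pipeline
-- (insert a space before each uppercase letter preceded by a non-uppercase character, then
-- split on spaces) and a dispatch table instead of the if/elif chain; objective: idiomatic.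
-- Equal return value proved on the whole domain (A is total).

-- ===== PORT A =====

-- stand-in for Python's str.capitalize (first char uppercased, rest lowercased); not in PySem
def pyCapitalize (w : List Char) : List Char :=
  match w with
  | [] => []
  | c :: t => PySem.Chars.upperChar c :: PySem.Chars.lower t

-- body of A's `for char in …` loop; state = (words, current_word)
def pvStepA (st : List (List Char) × List Char) (c : Char) : List (List Char) × List Char :=
  if PySem.Chars.isupper c && !st.2.isEmpty && !(PySem.Chars.isupper (st.2.getLast?.getD ' ')) then
    (st.1 ++ [st.2], [c])
  else if c == ' ' && !st.2.isEmpty then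
    (st.1 ++ [st.2], [])
  else
    (st.1, st.2 ++ [c])

-- `[w.strip().lower() for w in words if w.strip()]`
def pvClean (ws : List (List Char)) : List (List Char) :=
  (ws.filter (fun w => !(PySem.Chars.strip w).isEmpty)).map
    (fun w => PySem.Chars.lower (PySem.Chars.strip w))

-- A's whole word-extraction phase (loop + trailing-word flush + comprehension)
def pvWordsA (cs : List Char) : List (List Char) :=
  pvClean (if !(cs.foldl pvStepA ([], [])).2.isEmpty
           then (cs.foldl pvStepA ([], [])).1 ++ [(cs.foldl pvStepA ([], [])).2]
           else (cs.foldl pvStepA ([], [])).1)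

def apply_naming_convention (text : String) (convention : String) : String :=
  if PySem.Str.strip text == "" then text
  else
    let words := pvWordsA (PySem.Chars.replace (PySem.Chars.replace
      (PySem.Chars.replace text.toList ['_'] [' ']) ['-'] [' ']) ['.'] [' '])
    if words.isEmpty then text
    else if convention == "snake_case" then String.mk (PySem.Chars.join ['_'] words)
    else if convention == "camelCase" then
      String.mk (words.headD [] ++ PySem.Chars.join [] ((words.drop 1).map pyCapitalize))
    else if convention == "PascalCase" then String.mk (PySem.Chars.join [] (words.map pyCapitalize))
    else if convention == "kebab-case" then String.mk (PySem.Chars.join ['-'] words)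
    else if convention == "UPPER_CASE" then
      String.mk (PySem.Chars.join ['_'] (words.map PySem.Chars.upper))
    else if convention == "Title Case" then
      String.mk (PySem.Chars.join [' '] (words.map pyCapitalize))
    else if convention == "lowercase" then
      String.mk (PySem.Chars.lower (PySem.Chars.join [' '] words))
    else if convention == "Sentence case" then
      String.mk (pyCapitalize (PySem.Chars.join [' '] words))
    else text

-- ===== PORT B =====

-- str.capitalize, B's copy
def pyCapitalizeB (w : List Char) : List Char :=
  match w with
  | [] => []
  | c :: t => PySem.Chars.upperChar c :: PySem.Chars.lower t

-- one element of Source B's join-generator: emit ' '+c at a non-upper/upper boundary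
def pvMarkPair (pc : Option Char × Char) : List Char :=
  if PySem.Chars.isupper pc.2 && (match pc.1 with | some p => !PySem.Chars.isupper p | none => false) then
    [' ', pc.2]
  else [pc.2]

-- `[w.strip().lower() for w in marked.split(' ') if w.strip()]`, B's copy of the comprehension
def pvCleanB (ws : List (List Char)) : List (List Char) :=
  (ws.filter (fun w => !(PySem.Chars.strip w).isEmpty)).map
    (fun w => PySem.Chars.lower (PySem.Chars.strip w))

-- B's word extraction: mark case boundaries with spaces, split on ' ', clean up
def pvWordsB (cs : List Char) : List (List Char) :=
  pvCleanB (PySem.Chars.splitOn (((none :: cs.map some).zip cs).flatMap pvMarkPair) [' '])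

-- Source B's `formats` dict (values are the formatting lambdas)
def pvFormats : PySem.Dict String (List (List Char) → String) :=
  PySem.Dict.ofList [
    ("snake_case", fun ws => String.mk (PySem.Chars.join ['_'] ws)),
    ("camelCase", fun ws => String.mk (ws.headD [] ++ PySem.Chars.join [] ((ws.drop 1).map pyCapitalizeB))),
    ("PascalCase", fun ws => String.mk (PySem.Chars.join [] (ws.map pyCapitalizeB))),
    ("kebab-case", fun ws => String.mk (PySem.Chars.join ['-'] ws)),
    ("UPPER_CASE", fun ws => String.mk (PySem.Chars.join ['_'] (ws.map PySem.Chars.upper))),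
    ("Title Case", fun ws => String.mk (PySem.Chars.join [' '] (ws.map pyCapitalizeB))),
    ("lowercase", fun ws => String.mk (PySem.Chars.lower (PySem.Chars.join [' '] ws))),
    ("Sentence case", fun ws => String.mk (pyCapitalizeB (PySem.Chars.join [' '] ws)))]

def apply_naming_convention_alt (text : String) (convention : String) : String :=
  if PySem.Str.strip text == "" then text
  else
    let words := pvWordsB (PySem.Chars.replace (PySem.Chars.replace
      (PySem.Chars.replace text.toList ['_'] [' ']) ['-'] [' ']) ['.'] [' '])
    if words.isEmpty then text
    else
      match pvFormats.get? convention with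
      | some f => f words
      | none => text

-- ===== PRECONDITION & SPEC =====
def Spec_apply_naming_convention (text : String) (convention : String) (out : String) : Prop := out = apply_naming_convention_alt text convention
instance (text : String) (convention : String) (out : String) : Decidable (Spec_apply_naming_convention text convention out) := by unfold Spec_apply_naming_convention; infer_instance

-- ===== CLAIM (what is proved, stated in full; the proofs are below) =====
def Claim_equal_apply_naming_convention : Prop := ∀ (text : String) (convention : String), Dom_apply_naming_convention text convention → Spec_apply_naming_convention text convention (apply_naming_convention text convention)

-- ===== LEMMAS AND PROOFS =====

-- reference splitter: split a char list on single spaces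
def pvSplitSp : List Char → List (List Char)
  | [] => [[]]
  | c :: t => if c = ' ' then [] :: pvSplitSp t else (pvSplitSp t).modifyHead (fun w => c :: w)

-- reference marker: B's space insertion with explicit previous character
def pvMarkFrom (p : Char) : List Char → List Char
  | [] => []
  | c :: t => (if PySem.Chars.isupper c && !PySem.Chars.isupper p then [' ', c] else [c]) ++ pvMarkFrom c t

theorem pvSplitSp_space (b : List Char) : pvSplitSp (' ' :: b) = [] :: pvSplitSp b := by
  simp [pvSplitSp]

theorem pvSplitSp_cons {c : Char} (hc : c ≠ ' ') (b : List Char) :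
    pvSplitSp (c :: b) = (pvSplitSp b).modifyHead (fun w => c :: w) := by
  simp [pvSplitSp, hc]

theorem pvSplitSp_ne_nil (l : List Char) : pvSplitSp l ≠ [] := by
  induction l with
  | nil => simp [pvSplitSp]
  | cons c t ih =>
    by_cases hc : c = ' '
    · subst hc; rw [pvSplitSp_space]; simp
    · rw [pvSplitSp_cons hc]
      cases h : pvSplitSp t with
      | nil => exact absurd h ih
      | cons a b => simp

theorem pvSplitOn_go_eq (fuel : Nat) (l cur : List Char) (acc : List (List Char))
    (h : l.length < fuel) :
    PySem.Chars.splitOn.go [' '] fuel l cur acc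
      = acc.reverse ++ (pvSplitSp l).modifyHead (fun w => cur.reverse ++ w) := by
  induction fuel generalizing l cur acc with
  | zero => omega
  | succ n ih =>
    cases l with
    | nil => simp [PySem.Chars.splitOn.go, pvSplitSp]
    | cons c rest =>
      by_cases hc : c = ' '
      · subst hc
        have hpre : ([' '].isPrefixOf (' ' :: rest)) = true := by
          simp [List.isPrefixOf]
        simp only [PySem.Chars.splitOn.go]
        rw [if_pos hpre]
        simp only [List.length_cons, List.length_nil, Nat.zero_add, List.drop_succ_cons,
          List.drop_zero]
        rw [ih rest [] (cur.reverse :: acc) (by simp at h; omega)]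
        rw [pvSplitSp_space]
        cases hr : pvSplitSp rest with
        | nil => exact absurd hr (pvSplitSp_ne_nil rest)
        | cons a b => simp
      · have hpre : ([' '].isPrefixOf (c :: rest)) = false := by
          simp only [List.isPrefixOf, List.isPrefixOf_nil_left, Bool.and_true]
          simpa [beq_iff_eq] using fun hh => hc hh.symm
        simp only [PySem.Chars.splitOn.go]
        rw [if_neg (by simp [hpre])]
        rw [ih rest (c :: cur) acc (by simp at h; omega)]
        rw [pvSplitSp_cons hc]
        cases hr : pvSplitSp rest with
        | nil => exact absurd hr (pvSplitSp_ne_nil rest)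
        | cons a b => simp

theorem pvSplitOn_eq (l : List Char) :
    PySem.Chars.splitOn l [' '] = pvSplitSp l := by
  rw [PySem.Chars.splitOn, pvSplitOn_go_eq (l.length + 1) l [] [] (by omega)]
  cases hr : pvSplitSp l with
  | nil => exact absurd hr (pvSplitSp_ne_nil l)
  | cons a b => simp

theorem pvSplitSp_append_noSpace (a b : List Char) (h : ∀ c ∈ a, c ≠ ' ') :
    pvSplitSp (a ++ b) = (pvSplitSp b).modifyHead (fun w => a ++ w) := by
  induction a with
  | nil =>
    simp only [List.nil_append]
    cases hb : pvSplitSp b with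
    | nil => exact absurd hb (pvSplitSp_ne_nil b)
    | cons w l => simp
  | cons c t ih =>
    have hc : c ≠ ' ' := h c (by simp)
    rw [List.cons_append, pvSplitSp_cons hc, ih (fun x hx => h x (by simp [hx]))]
    cases hb : pvSplitSp b with
    | nil => exact absurd hb (pvSplitSp_ne_nil b)
    | cons w l => simp

theorem pvClean_append (x y : List (List Char)) : pvClean (x ++ y) = pvClean x ++ pvClean y := by
  simp [pvClean]

theorem pvStrip_space_cons (u : List Char) :
    PySem.Chars.strip (' ' :: u) = PySem.Chars.strip u := by
  simp [PySem.Chars.strip, PySem.Chars.lstrip, PySem.Chars.isspace]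

theorem pvStrip_nil : PySem.Chars.strip [] = [] := by
  simp [PySem.Chars.strip, PySem.Chars.lstrip, PySem.Chars.rstrip]

theorem pvClean_nil_cons (l : List (List Char)) : pvClean ([] :: l) = pvClean l := by
  simp [pvClean, List.filter_cons, pvStrip_nil]

theorem pvClean_single_congr (x y : List Char) (h : PySem.Chars.strip x = PySem.Chars.strip y) :
    pvClean [x] = pvClean [y] := by
  by_cases hy : PySem.Chars.strip y = [] <;>
    simp [pvClean, List.filter_cons, h, hy]

-- clean ∘ split of one pending word (no interior spaces) is clean of the word itself
theorem pvClean_splitSp_single (cur : List Char) (h : ∀ c ∈ cur.tail, c ≠ ' ') :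
    pvClean (pvSplitSp cur) = pvClean [cur] := by
  cases cur with
  | nil => rfl
  | cons c u =>
    have hu : ∀ x ∈ u, x ≠ ' ' := by simpa using h
    have hu' : pvSplitSp u = [u] := by
      conv_lhs => rw [← List.append_nil u]
      rw [pvSplitSp_append_noSpace u [] hu]
      simp [pvSplitSp]
    by_cases hc : c = ' '
    · subst hc
      rw [pvSplitSp_space, pvClean_nil_cons, hu']
      exact pvClean_single_congr u (' ' :: u) (pvStrip_space_cons u).symm
    · rw [pvSplitSp_cons hc, hu']
      simp

-- splitting `cur ++ ' ' :: b` closes the pending word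
theorem pvClean_splitSp_flush (cur b : List Char) (h : ∀ c ∈ cur.tail, c ≠ ' ') :
    pvClean (pvSplitSp (cur ++ ' ' :: b)) = pvClean [cur] ++ pvClean (pvSplitSp b) := by
  cases cur with
  | nil =>
    rw [List.nil_append, pvSplitSp_space, pvClean_nil_cons]
    simp [pvClean, List.filter_cons, pvStrip_nil]
  | cons c u =>
    have hu : ∀ x ∈ u, x ≠ ' ' := by simpa using h
    by_cases hc : c = ' '
    · subst hc
      rw [List.cons_append, pvSplitSp_space, pvClean_nil_cons,
        pvSplitSp_append_noSpace u (' ' :: b) hu, pvSplitSp_space]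
      simp only [List.modifyHead, List.append_nil]
      rw [show u :: pvSplitSp b = [u] ++ pvSplitSp b from rfl, pvClean_append,
        pvClean_single_congr u (' ' :: u) (pvStrip_space_cons u).symm]
    · have hcu : ∀ x ∈ c :: u, x ≠ ' ' := by
        intro x hx
        rcases List.mem_cons.mp hx with rfl | hx
        · exact hc
        · exact hu x hx
      rw [List.cons_append, pvSplitSp_cons hc,
        pvSplitSp_append_noSpace u (' ' :: b) hu, pvSplitSp_space]
      simp only [List.modifyHead, List.append_nil]
      rw [show (c :: u) :: pvSplitSp b = [c :: u] ++ pvSplitSp b from rfl, pvClean_append]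

-- the marker with explicit previous char is Source B's zip-with-previous generator
theorem pvMarkFrom_eq_zip (cs : List Char) (p : Char) :
    ((some p :: cs.map some).zip cs).flatMap pvMarkPair = pvMarkFrom p cs := by
  induction cs generalizing p with
  | nil => rfl
  | cons c t ih =>
    simp only [List.map_cons, List.zip_cons_cons, List.flatMap_cons, ih, pvMarkFrom]
    simp [pvMarkPair]

-- MAIN INVARIANT: A's loop state vs B's mark-then-split on the remaining input
theorem pvMain (cs : List Char) (ws : List (List Char)) (cur : List Char) (p : Char)
    (hlast : cur ≠ [] → cur.getLast? = some p) (htail : ∀ c ∈ cur.tail, c ≠ ' ') :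
    pvClean (if !(List.foldl pvStepA (ws, cur) cs).2.isEmpty
             then (List.foldl pvStepA (ws, cur) cs).1 ++ [(List.foldl pvStepA (ws, cur) cs).2]
             else (List.foldl pvStepA (ws, cur) cs).1)
      = pvClean ws ++ pvClean (pvSplitSp (cur ++ pvMarkFrom p cs)) := by
  induction cs generalizing ws cur p with
  | nil =>
    simp only [List.foldl_nil]
    rw [show pvMarkFrom p [] = [] from rfl, List.append_nil,
      pvClean_splitSp_single cur htail]
    cases cur with
    | nil => simp [pvClean, pvStrip_nil, List.filter_cons]
    | cons d u => simp [pvClean_append]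
  | cons c t ih =>
    simp only [List.foldl_cons]
    by_cases h1 : (PySem.Chars.isupper c && !cur.isEmpty && !(PySem.Chars.isupper (cur.getLast?.getD ' '))) = true
    · have hcur : cur ≠ [] := by
        intro hh; subst hh; simp at h1
      rw [Bool.and_eq_true, Bool.and_eq_true] at h1
      obtain ⟨⟨hup, -⟩, hlastb⟩ := h1
      have hgl : (cur.getLast?).getD ' ' = p := by rw [hlast hcur]; rfl
      have hpl : PySem.Chars.isupper p = false := by
        rw [← hgl]; simpa using hlastb
      rw [show pvStepA (ws, cur) c = (ws ++ [cur], [c]) from by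
        simp only [pvStepA]
        rw [if_pos (by simp [hup, hgl, hpl, List.isEmpty_eq_false_iff.mpr hcur])]]
      rw [ih (ws ++ [cur]) [c] c (fun _ => rfl) (by simp)]
      rw [show pvMarkFrom p (c :: t) = ' ' :: c :: pvMarkFrom c t from by
        simp [pvMarkFrom, hup, hpl]]
      rw [pvClean_splitSp_flush cur (c :: pvMarkFrom c t) htail, pvClean_append]
      simp [List.singleton_append]
    · by_cases h2 : (c == ' ' && !cur.isEmpty) = true
      · rw [Bool.and_eq_true] at h2
        obtain ⟨hceq, hne⟩ := h2
        have hc : c = ' ' := by simpa using hceq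
        have hcur : cur ≠ [] := by simpa using hne
        subst hc
        rw [show pvStepA (ws, cur) ' ' = (ws ++ [cur], []) from by
          simp only [pvStepA]
          rw [if_neg h1, if_pos (by simp [hne])]]
        rw [ih (ws ++ [cur]) [] ' ' (fun hh => absurd rfl hh) (by simp)]
        rw [show pvMarkFrom p (' ' :: t) = ' ' :: pvMarkFrom ' ' t from by
          simp [pvMarkFrom, show PySem.Chars.isupper ' ' = false from by decide]]
        rw [pvClean_splitSp_flush cur (pvMarkFrom ' ' t) htail, pvClean_append]
        simp
      · have hstep : pvStepA (ws, cur) c = (ws, cur ++ [c]) := by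
          simp only [pvStepA]
          rw [if_neg h1, if_neg h2]
        rw [hstep]
        cases cur with
        | nil =>
          simp only [List.nil_append]
          rw [ih ws [c] c (fun _ => rfl) (by simp)]
          by_cases hins : (PySem.Chars.isupper c && !PySem.Chars.isupper p) = true
          · rw [show pvMarkFrom p (c :: t) = ' ' :: c :: pvMarkFrom c t from by
              simp only [pvMarkFrom]; rw [if_pos hins]; rfl]
            rw [pvSplitSp_space, pvClean_nil_cons]
            simp [List.singleton_append]
          · rw [show pvMarkFrom p (c :: t) = c :: pvMarkFrom c t from by
              simp only [pvMarkFrom]; rw [if_neg hins]; rfl]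
            simp [List.singleton_append]
        | cons d u =>
          have hcsp : c ≠ ' ' := by
            intro hh; subst hh
            exact h2 (by simp)
          have hlast' : (d :: u) ++ [c] ≠ [] → ((d :: u) ++ [c]).getLast? = some c :=
            fun _ => by rw [List.getLast?_concat]
          have htail' : ∀ x ∈ ((d :: u) ++ [c]).tail, x ≠ ' ' := by
            intro x hx
            simp only [List.cons_append, List.tail_cons, List.mem_append,
              List.mem_singleton] at hx
            rcases hx with hx | rfl
            · exact htail x (by simpa using hx)
            · exact hcsp
          rw [ih ws ((d :: u) ++ [c]) c hlast' htail']
          have hnoins : ¬ (PySem.Chars.isupper c && !PySem.Chars.isupper p) = true := by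
            intro hins
            rw [Bool.and_eq_true] at hins
            apply h1
            have hgl : (((d :: u) : List Char).getLast?).getD ' ' = p := by
              rw [hlast (by simp)]; rfl
            rw [Bool.and_eq_true, Bool.and_eq_true]
            exact ⟨⟨hins.1, by simp⟩, by rw [hgl]; exact hins.2⟩
          rw [show pvMarkFrom p (c :: t) = c :: pvMarkFrom c t from by
            simp only [pvMarkFrom]; rw [if_neg hnoins]; rfl]
          simp [List.append_assoc]

-- A's and B's word lists coincide
theorem pvWords_eq (cs : List Char) : pvWordsB cs = pvWordsA cs := by
  rw [pvWordsB, pvWordsA, show pvCleanB = pvClean from rfl, pvSplitOn_eq]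
  cases cs with
  | nil => simp [pvClean, pvSplitSp, pvStrip_nil, List.filter_cons]
  | cons c t =>
    have hz : ((none :: (c :: t).map some).zip (c :: t)).flatMap pvMarkPair
        = c :: pvMarkFrom c t := by
      simp only [List.map_cons, List.zip_cons_cons, List.flatMap_cons, pvMarkFrom_eq_zip]
      simp [pvMarkPair]
    rw [hz]
    have hm := pvMain (c :: t) [] [] 'A' (fun hh => absurd rfl hh) (by simp)
    rw [show pvMarkFrom 'A' (c :: t) = c :: pvMarkFrom c t from by
      simp [pvMarkFrom, show PySem.Chars.isupper 'A' = true from by decide]] at hm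
    rw [show pvClean ([] : List (List Char)) = [] from rfl] at hm
    simp only [List.nil_append] at hm
    exact hm.symm

theorem pvGet_snake : pvFormats.get? "snake_case"
    = some (fun ws => String.mk (PySem.Chars.join ['_'] ws)) := by
  simp [pvFormats, PySem.Dict.ofList, PySem.Dict.update, PySem.Dict.insert, PySem.Dict.empty,
    PySem.Dict.get?, PySem.Dict.contains, List.find?]

theorem pvGet_camel : pvFormats.get? "camelCase"
    = some (fun ws => String.mk (ws.headD [] ++ PySem.Chars.join [] ((ws.drop 1).map pyCapitalizeB))) := by
  simp [pvFormats, PySem.Dict.ofList, PySem.Dict.update, PySem.Dict.insert, PySem.Dict.empty,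
    PySem.Dict.get?, PySem.Dict.contains, List.find?]

theorem pvGet_pascal : pvFormats.get? "PascalCase"
    = some (fun ws => String.mk (PySem.Chars.join [] (ws.map pyCapitalizeB))) := by
  simp [pvFormats, PySem.Dict.ofList, PySem.Dict.update, PySem.Dict.insert, PySem.Dict.empty,
    PySem.Dict.get?, PySem.Dict.contains, List.find?]

theorem pvGet_kebab : pvFormats.get? "kebab-case"
    = some (fun ws => String.mk (PySem.Chars.join ['-'] ws)) := by
  simp [pvFormats, PySem.Dict.ofList, PySem.Dict.update, PySem.Dict.insert, PySem.Dict.empty,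
    PySem.Dict.get?, PySem.Dict.contains, List.find?]

theorem pvGet_upper : pvFormats.get? "UPPER_CASE"
    = some (fun ws => String.mk (PySem.Chars.join ['_'] (ws.map PySem.Chars.upper))) := by
  simp [pvFormats, PySem.Dict.ofList, PySem.Dict.update, PySem.Dict.insert, PySem.Dict.empty,
    PySem.Dict.get?, PySem.Dict.contains, List.find?]

theorem pvGet_title : pvFormats.get? "Title Case"
    = some (fun ws => String.mk (PySem.Chars.join [' '] (ws.map pyCapitalizeB))) := by
  simp [pvFormats, PySem.Dict.ofList, PySem.Dict.update, PySem.Dict.insert, PySem.Dict.empty,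
    PySem.Dict.get?, PySem.Dict.contains, List.find?]

theorem pvGet_lower : pvFormats.get? "lowercase"
    = some (fun ws => String.mk (PySem.Chars.lower (PySem.Chars.join [' '] ws))) := by
  simp [pvFormats, PySem.Dict.ofList, PySem.Dict.update, PySem.Dict.insert, PySem.Dict.empty,
    PySem.Dict.get?, PySem.Dict.contains, List.find?]

theorem pvGet_sentence : pvFormats.get? "Sentence case"
    = some (fun ws => String.mk (pyCapitalizeB (PySem.Chars.join [' '] ws))) := by
  simp [pvFormats, PySem.Dict.ofList, PySem.Dict.update, PySem.Dict.insert, PySem.Dict.empty,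
    PySem.Dict.get?, PySem.Dict.contains, List.find?]

theorem pvGet_none (c : String) (h1 : ¬ c = "snake_case") (h2 : ¬ c = "camelCase")
    (h3 : ¬ c = "PascalCase") (h4 : ¬ c = "kebab-case") (h5 : ¬ c = "UPPER_CASE")
    (h6 : ¬ c = "Title Case") (h7 : ¬ c = "lowercase") (h8 : ¬ c = "Sentence case") :
    pvFormats.get? c = none := by
  have e1 : ("snake_case" == c) = false := by simp; exact fun hh => h1 hh.symm
  have e2 : ("camelCase" == c) = false := by simp; exact fun hh => h2 hh.symm
  have e3 : ("PascalCase" == c) = false := by simp; exact fun hh => h3 hh.symm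
  have e4 : ("kebab-case" == c) = false := by simp; exact fun hh => h4 hh.symm
  have e5 : ("UPPER_CASE" == c) = false := by simp; exact fun hh => h5 hh.symm
  have e6 : ("Title Case" == c) = false := by simp; exact fun hh => h6 hh.symm
  have e7 : ("lowercase" == c) = false := by simp; exact fun hh => h7 hh.symm
  have e8 : ("Sentence case" == c) = false := by simp; exact fun hh => h8 hh.symm
  simp [pvFormats, PySem.Dict.ofList, PySem.Dict.update, PySem.Dict.insert, PySem.Dict.empty,
    PySem.Dict.get?, PySem.Dict.contains, List.find?, e1, e2, e3, e4, e5, e6, e7, e8]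

theorem apply_naming_convention_eq (text convention : String) :
    apply_naming_convention text convention = apply_naming_convention_alt text convention := by
  unfold apply_naming_convention apply_naming_convention_alt
  by_cases hstrip : (PySem.Str.strip text == "") = true
  · rw [if_pos hstrip, if_pos hstrip]
  · rw [if_neg hstrip, if_neg hstrip]
    simp only [pvWords_eq]
    set ws := pvWordsA (PySem.Chars.replace (PySem.Chars.replace
      (PySem.Chars.replace text.toList ['_'] [' ']) ['-'] [' ']) ['.'] [' ']) with hws
    by_cases hemp : ws.isEmpty = true
    · rw [if_pos hemp, if_pos hemp]
    · rw [if_neg hemp, if_neg hemp]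
      by_cases h1 : convention = "snake_case"
      · subst h1
        rw [if_pos (by simp), pvGet_snake]
      · rw [if_neg (by simpa using h1)]
        by_cases h2 : convention = "camelCase"
        · subst h2
          rw [if_pos (by simp), pvGet_camel]
          rfl
        · rw [if_neg (by simpa using h2)]
          by_cases h3 : convention = "PascalCase"
          · subst h3
            rw [if_pos (by simp), pvGet_pascal]
            rfl
          · rw [if_neg (by simpa using h3)]
            by_cases h4 : convention = "kebab-case"
            · subst h4
              rw [if_pos (by simp), pvGet_kebab]
            · rw [if_neg (by simpa using h4)]
              by_cases h5 : convention = "UPPER_CASE"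
              · subst h5
                rw [if_pos (by simp), pvGet_upper]
              · rw [if_neg (by simpa using h5)]
                by_cases h6 : convention = "Title Case"
                · subst h6
                  rw [if_pos (by simp), pvGet_title]
                  rfl
                · rw [if_neg (by simpa using h6)]
                  by_cases h7 : convention = "lowercase"
                  · subst h7
                    rw [if_pos (by simp), pvGet_lower]
                  · rw [if_neg (by simpa using h7)]
                    by_cases h8 : convention = "Sentence case"
                    · subst h8
                      rw [if_pos (by simp), pvGet_sentence]
                      rfl
                    · rw [if_neg (by simpa using h8),
                        pvGet_none convention h1 h2 h3 h4 h5 h6 h7 h8]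

-- ===== VERDICT (by name: the statement is the Claim_ definition above) =====
theorem apply_naming_convention_spec : Claim_equal_apply_naming_convention := by
  intro text convention _
  exact apply_naming_convention_eq text convention
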